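-- pv_equiv track=rewrite | github.com/RichealYoung/BRIEF_PyTorch | utils/Networks.py | calc_param_count
-- ===== SOURCE A (Python) =====
-- def calc_param_count(coords_channel,data_channel,features,layers,res,features_dis,**kwargs):
--     if res:
--         param_count=coords_channel*features+features+2*(layers-2)*(features**2+features)+features*data_channel+data_channel
--     else:
--         # param_count=coords_channel*features+features+(layers-2)*(features**2+features)+features*data_channel+data_channel
--         param_count=coords_channel*features+features
--         for i in range(layers-2):
--             param_count += (features-i*features_dis)*(features-(i+1)*features_dis) + (features-(i+1)*features_dis)
--         param_count += (features-(layers-2)*features_dis)*data_channel+data_channel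
--     return int(param_count)
-- ===== SOURCE B (Python) =====
-- def calc_param_count(coords_channel, data_channel, features, layers, res, features_dis, **kwargs):
--     if res:
--         return coords_channel*features + features + 2*(layers-2)*(features**2 + features) + features*data_channel + data_channel
--     n = max(layers - 2, 0)
--     f, d = features, features_dis
--     s1 = n*(n-1)//2            # sum of i for i in range(n)
--     s2 = n*(n-1)*(2*n-1)//6    # sum of i*i for i in range(n)
--     loop = n*(f*f + f) - f*d*(2*s1 + n) + d*d*(s2 + s1) - d*(s1 + n)
--     return coords_channel*f + f + loop + (f - (layers-2)*d)*data_channel + data_channel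
-- ===== Notes on version B (the rewrite author's own statement) =====
-- stated objective: faster
-- what changed: Replaces the O(layers) accumulation loop over range(layers-2) by a closed-form expression using the Gauss and square-pyramidal summation formulas (sum i, sum i^2).
import Mathlib
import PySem

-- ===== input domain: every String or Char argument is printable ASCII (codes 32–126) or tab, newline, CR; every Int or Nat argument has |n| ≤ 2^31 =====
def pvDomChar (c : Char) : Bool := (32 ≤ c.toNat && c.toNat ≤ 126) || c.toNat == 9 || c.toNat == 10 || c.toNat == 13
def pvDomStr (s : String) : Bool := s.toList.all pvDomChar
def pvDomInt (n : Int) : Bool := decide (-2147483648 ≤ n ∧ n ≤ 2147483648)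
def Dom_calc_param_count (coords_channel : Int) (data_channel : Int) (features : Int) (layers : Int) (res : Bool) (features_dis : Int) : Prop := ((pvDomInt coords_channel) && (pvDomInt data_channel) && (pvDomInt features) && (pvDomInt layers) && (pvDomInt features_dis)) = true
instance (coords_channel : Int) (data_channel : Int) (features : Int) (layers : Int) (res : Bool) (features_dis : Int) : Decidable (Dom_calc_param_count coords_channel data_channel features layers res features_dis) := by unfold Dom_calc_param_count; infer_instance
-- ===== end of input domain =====

-- B replaces A's O(layers) accumulation loop by a closed-form O(1) expression via the ∑i and ∑i² formulas.


-- ===== PORT A =====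
def calc_param_count (coords_channel : Int) (data_channel : Int) (features : Int) (layers : Int) (res : Bool) (features_dis : Int) : Int :=
  if res then
    coords_channel*features + features + 2*(layers-2)*(features^2 + features) + features*data_channel + data_channel
  else
    let pc0 := coords_channel*features + features
    let pc := (PySem.List.pyRange 0 (layers-2) 1).foldl
      (fun param_count i =>
        param_count + ((features - i*features_dis)*(features - (i+1)*features_dis) + (features - (i+1)*features_dis)))
      pc0
    pc + (features - (layers-2)*features_dis)*data_channel + data_channel

-- ===== PORT B =====
def calc_param_count_alt (coords_channel : Int) (data_channel : Int) (features : Int) (layers : Int) (res : Bool) (features_dis : Int) : Int :=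
  if res then
    coords_channel*features + features + 2*(layers-2)*(features^2 + features) + features*data_channel + data_channel
  else
    let n := max (layers - 2) 0
    let f := features
    let d := features_dis
    let s1 := PySem.Int.floordiv (n*(n-1)) 2
    let s2 := PySem.Int.floordiv (n*(n-1)*(2*n-1)) 6
    let loop := n*(f*f + f) - f*d*(2*s1 + n) + d*d*(s2 + s1) - d*(s1 + n)
    coords_channel*f + f + loop + (f - (layers-2)*d)*data_channel + data_channel

-- ===== PRECONDITION & SPEC =====
def Spec_calc_param_count (coords_channel : Int) (data_channel : Int) (features : Int) (layers : Int) (res : Bool) (features_dis : Int) (out : Int) : Prop := out = calc_param_count_alt coords_channel data_channel features layers res features_dis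
instance (coords_channel : Int) (data_channel : Int) (features : Int) (layers : Int) (res : Bool) (features_dis : Int) (out : Int) : Decidable (Spec_calc_param_count coords_channel data_channel features layers res features_dis out) := by unfold Spec_calc_param_count; infer_instance

-- ===== CLAIM (what is proved, stated in full; the proofs are below) =====
def Claim_equal_calc_param_count : Prop := ∀ (coords_channel : Int) (data_channel : Int) (features : Int) (layers : Int) (res : Bool) (features_dis : Int), Dom_calc_param_count coords_channel data_channel features layers res features_dis → Spec_calc_param_count coords_channel data_channel features layers res features_dis (calc_param_count coords_channel data_channel features layers res features_dis)

-- ===== LEMMAS AND PROOFS =====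

-- exact value of A's loop, as a recursive function of the trip count
def pvT (f d : Int) : Nat → Int
  | 0 => 0
  | m+1 => pvT f d m + ((f - (m:Int)*d)*(f - ((m:Int)+1)*d) + (f - ((m:Int)+1)*d))

lemma pvFoldA (f d acc : Int) (m : Nat) :
    (PySem.List.pyRange 0 (m:Int) 1).foldl
      (fun pc i => pc + ((f - i*d)*(f - (i+1)*d) + (f - (i+1)*d))) acc
      = acc + pvT f d m := by
  induction m with
  | zero => simp [pvT]
  | succ k ih =>
    have h : ((k+1 : Nat) : Int) = (k : Int) + 1 := by push_cast; ring
    rw [h, PySem.List.pyRange_one_succ_right (by positivity), List.foldl_append, ih]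
    simp [pvT]
    ring

lemma pvT6 (f d : Int) (m : Nat) :
    6 * pvT f d m
      = 6*(m:Int)*(f*f + f) - 6*f*d*(m:Int)^2
        + 2*d*d*(m:Int)*((m:Int)^2 - 1) - 3*d*(m:Int)*((m:Int) + 1) := by
  induction m with
  | zero => simp [pvT]
  | succ k ih =>
    rw [pvT]
    push_cast
    ring_nf
    ring_nf at ih
    linarith

lemma pvDvd2 (M : Int) : (2:Int) ∣ M*(M-1) := by
  have h : Even ((M-1) * (M-1+1)) := Int.even_mul_succ_self (M-1)
  have : (M-1) * (M-1+1) = M*(M-1) := by ring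
  rw [this] at h
  exact h.two_dvd

lemma pvDvd6 (m : Nat) : (6:Int) ∣ (m:Int)*((m:Int)-1)*(2*(m:Int)-1) := by
  induction m with
  | zero => simp
  | succ k ih =>
    obtain ⟨c, hc⟩ := ih
    refine ⟨c + (k:Int)^2, ?_⟩
    push_cast
    linear_combination hc

lemma pvS1 (m : Nat) :
    2 * PySem.Int.floordiv ((m:Int)*((m:Int)-1)) 2 = (m:Int)*((m:Int)-1) := by
  rw [PySem.Int.floordiv_eq_ediv_of_pos (by norm_num)]
  rw [Int.mul_ediv_cancel' (pvDvd2 _)]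

lemma pvS2 (m : Nat) :
    6 * PySem.Int.floordiv ((m:Int)*((m:Int)-1)*(2*(m:Int)-1)) 6
      = (m:Int)*((m:Int)-1)*(2*(m:Int)-1) := by
  rw [PySem.Int.floordiv_eq_ediv_of_pos (by norm_num)]
  rw [Int.mul_ediv_cancel' (pvDvd6 _)]

-- ===== VERDICT (by name: the statement is the Claim_ definition above) =====
theorem calc_param_count_spec : Claim_equal_calc_param_count := by
  intro cc dc f l res d _
  unfold Spec_calc_param_count calc_param_count calc_param_count_alt
  cases res with
  | true => simp
  | false =>
    simp only [Bool.false_eq_true, if_false]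
    by_cases h : l - 2 ≤ 0
    · rw [PySem.List.pyRange_one_eq_nil (by omega)]
      have hn : max (l - 2) 0 = 0 := by omega
      simp [hn, PySem.Int.floordiv]
    · replace h : 0 < l - 2 := by omega
      set m : Nat := (l - 2).toNat with hm
      have hM : ((m:Int)) = l - 2 := by omega
      rw [← hM]
      rw [show max ((m:Int)) 0 = (m:Int) by omega]
      rw [pvFoldA]
      have h1 := pvS1 m
      have h2 := pvS2 m
      have h6 := pvT6 f d m
      set s1 := PySem.Int.floordiv ((m:Int)*((m:Int)-1)) 2
      set s2 := PySem.Int.floordiv ((m:Int)*((m:Int)-1)*(2*(m:Int)-1)) 6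
      have key : (6:Int) * pvT f d m
          = 6 * ((m:Int)*(f*f + f) - f*d*(2*s1 + (m:Int)) + d*d*(s2 + s1) - d*(s1 + (m:Int))) := by
        linear_combination h6 + (6*f*d - 3*d*d + 3*d) * h1 + (-(d*d)) * h2
      have hpv := mul_left_cancel₀ (by norm_num : (6:Int) ≠ 0) key
      linarith [hpv]
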